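-- pv_equiv track=rewrite | github.com/rolanvc-gmail/weather_gan | data/data_stats.py | get_min_files_in_days
-- ===== SOURCE A (Python) =====
-- from typing import Tuple
--
-- def get_min_files_in_days(data, cutoff) -> Tuple[int, int, int, int]:
--     """
--     Given the data_dict computed above, and a cutoff, we compute:
--     1. total_days:int, the total days of the dataset.
--     2. cutoff:int, the cutoff passed as a parameter.
--     3. min_files:int, the smallest number of files (greater than the cutoff) that a day can have.
--     4. lower_than_cutoff:int, an array of days in mo/day format which has less files than the cutoff.
--     :param data:
--     :param cutoff:
--     :return:
--     """
--     min_files = 1000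
--     lower_than_cutoff = []
--     total_days = 0
--     months = data.keys()
--     for mo in months:  # iterate through the months
--         days = data[mo]['days'].keys()
--         for day in days:  # iterate through the days in the month
--             total_days += 1
--             n_files = data[mo]['days'][day]
--             if n_files < cutoff:
--                 lower_than_cutoff.append("{}/{}".format(mo, day))
--                 continue
--             if n_files < min_files:
--                 min_files = n_files
--
--     return total_days, cutoff, min_files, len(lower_than_cutoff)
-- ===== SOURCE B (Python) =====
-- def get_min_files_in_days(data, cutoff):
--     counts = [n for mo in data for n in data[mo]['days'].values()]
--     above = [n for n in counts if n >= cutoff]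
--     return (len(counts), cutoff, min(above + [1000]),
--             sum(1 for n in counts if n < cutoff))
-- ===== Notes on version B (the rewrite author's own statement) =====
-- stated objective: simpler
-- what changed: Replaces the nested loops with a mutable 4-part accumulator (running min, growing string list, counter) by one flattened list of day file counts followed by len/min/sum over comprehensions, never building the mo/day strings.
import Mathlib
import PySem

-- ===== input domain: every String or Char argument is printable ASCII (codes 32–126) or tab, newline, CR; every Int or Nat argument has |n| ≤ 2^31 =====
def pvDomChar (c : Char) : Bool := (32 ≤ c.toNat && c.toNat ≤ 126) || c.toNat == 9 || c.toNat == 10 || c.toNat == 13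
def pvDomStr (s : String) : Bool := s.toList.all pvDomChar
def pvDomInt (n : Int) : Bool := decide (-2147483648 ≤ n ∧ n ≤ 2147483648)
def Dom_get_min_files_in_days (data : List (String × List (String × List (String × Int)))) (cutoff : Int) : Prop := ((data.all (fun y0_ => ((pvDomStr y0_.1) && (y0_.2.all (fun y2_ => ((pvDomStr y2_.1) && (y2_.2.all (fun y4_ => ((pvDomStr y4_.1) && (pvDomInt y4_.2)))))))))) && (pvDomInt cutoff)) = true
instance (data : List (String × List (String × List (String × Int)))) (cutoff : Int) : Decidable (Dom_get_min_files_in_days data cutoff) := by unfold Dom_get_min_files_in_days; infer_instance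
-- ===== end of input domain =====

-- B replaces A's nested loops with a mutable 4-part accumulator by one flattened
-- list of day counts and len/min/sum over comprehensions (objective: simpler).

-- ===== PORT A =====
def get_min_files_in_days (data : List (String × List (String × List (String × Int)))) (cutoff : Int) : Int × Int × Int × Int :=
  let d := PySem.Dict.ofList data
  let st := d.keys.foldl (fun (st : Int × List String × Int) mo =>
      let days := PySem.Dict.ofList ((PySem.Dict.ofList (d.getD mo [])).getD "days" [])
      days.keys.foldl (fun (st : Int × List String × Int) day =>
          let total := st.1 + 1
          let n := days.getD day 0
          if n < cutoff then (total, st.2.1 ++ [mo ++ "/" ++ day], st.2.2)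
          else if n < st.2.2 then (total, st.2.1, n)
          else (total, st.2.1, st.2.2)) st)
    ((0 : Int), ([] : List String), (1000 : Int))
  (st.1, cutoff, st.2.2, (st.2.1.length : Int))

-- ===== PORT B =====
def get_min_files_in_days_alt (data : List (String × List (String × List (String × Int)))) (cutoff : Int) : Int × Int × Int × Int :=
  let d := PySem.Dict.ofList data
  let counts := d.keys.flatMap (fun mo =>
      (PySem.Dict.ofList ((PySem.Dict.ofList (d.getD mo [])).getD "days" [])).values)
  let above := counts.filter (fun n => cutoff ≤ n)
  ((counts.length : Int), cutoff,
   (PySem.List.min? (above ++ [1000]) (fun y => y)).getD 1000,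
   ((counts.filter (fun n => n < cutoff)).length : Int))

-- ===== PRECONDITION & SPEC =====
-- Pre_ excludes exactly the inputs on which Python A raises KeyError: a month whose
-- dict has no "days" key (B raises there too).
def Pre_get_min_files_in_days (data : List (String × List (String × List (String × Int)))) (cutoff : Int) : Prop :=
  ∀ p ∈ (PySem.Dict.ofList data).items, (PySem.Dict.ofList p.2).contains "days" = true
instance (data : List (String × List (String × List (String × Int)))) (cutoff : Int) : Decidable (Pre_get_min_files_in_days data cutoff) := by unfold Pre_get_min_files_in_days; infer_instance

def pvWitness_get_min_files_in_days : (List (String × List (String × List (String × Int)))) × Int :=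
  ([("01", [("days", [("01", 5), ("02", 1)])]), ("02", [("days", [("03", 7)])])], 3)

def Spec_get_min_files_in_days (data : List (String × List (String × List (String × Int)))) (cutoff : Int) (out : Int × Int × Int × Int) : Prop := out = get_min_files_in_days_alt data cutoff
instance (data : List (String × List (String × List (String × Int)))) (cutoff : Int) (out : Int × Int × Int × Int) : Decidable (Spec_get_min_files_in_days data cutoff out) := by unfold Spec_get_min_files_in_days; infer_instance

-- ===== CLAIM (what is proved, stated in full; the proofs are below) =====
def Claim_equal_get_min_files_in_days : Prop := ∀ (data : List (String × List (String × List (String × Int)))) (cutoff : Int), Dom_get_min_files_in_days data cutoff → Pre_get_min_files_in_days data cutoff → Spec_get_min_files_in_days data cutoff (get_min_files_in_days data cutoff)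

-- ===== LEMMAS AND PROOFS =====

-- running-min step of A restricted to values ≥ cutoff
def pvMstep (cutoff m n : Int) : Int := if n < cutoff then m else if n < m then n else m

theorem pv_inner (cutoff : Int) (v : String → Int) (f : String → String) :
    ∀ (ks : List String) (t : Int) (l : List String) (m : Int),
    ks.foldl (fun (st : Int × List String × Int) day =>
        let total := st.1 + 1
        let n := v day
        if n < cutoff then (total, st.2.1 ++ [f day], st.2.2)
        else if n < st.2.2 then (total, st.2.1, n)
        else (total, st.2.1, st.2.2)) (t, l, m)
      = (t + ((ks.map v).length : Int),
         l ++ ((ks.filter (fun day => v day < cutoff)).map f),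
         (ks.map v).foldl (pvMstep cutoff) m) := by
  intro ks
  induction ks with
  | nil => intro t l m; simp
  | cons k ks ih =>
    intro t l m
    by_cases h : v k < cutoff
    · simp [h, ih, Prod.ext_iff, pvMstep]
      ring
    · by_cases h2 : v k < m
      · simp [h, h2, ih, Prod.ext_iff, pvMstep]
        ring
      · simp [h, h2, ih, Prod.ext_iff, pvMstep]
        ring

theorem pv_foldl_min_min (t : List Int) : ∀ a b : Int, t.foldl min (min a b) = min (t.foldl min a) b := by
  induction t with
  | nil => intro a b; rfl
  | cons c t ih =>
    intro a b
    simp only [List.foldl_cons]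
    rw [min_right_comm a b c, ih]

theorem pv_min_append (l : List Int) (a : Int) :
    (PySem.List.min? (l ++ [a]) (fun y => y)).getD a = l.foldl min a := by
  induction l with
  | nil => simp [PySem.List.min?_id_cons]
  | cons x t ih =>
    rw [List.cons_append, PySem.List.min?_id_cons, Option.getD_some, List.foldl_append,
        List.foldl_cons, List.foldl_nil, ← pv_foldl_min_min, min_comm x a]
    simp [List.foldl_cons]

theorem pv_mstep_filter (cutoff : Int) : ∀ (l : List Int) (m : Int),
    l.foldl (pvMstep cutoff) m = (l.filter (fun n => cutoff ≤ n)).foldl min m := by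
  intro l
  induction l with
  | nil => intro m; rfl
  | cons x t ih =>
    intro m
    by_cases h : x < cutoff
    · have hd : (decide (cutoff ≤ x)) = false := by simp; omega
      simp [pvMstep, h, hd, ih]
    · have hd : (decide (cutoff ≤ x)) = true := by simp; omega
      simp only [List.foldl_cons, List.filter_cons, pvMstep, if_neg h, hd, if_true]
      rw [ih]
      congr 1
      simp only [min_def]
      split_ifs <;> omega

-- ===== VERDICT (by name: the statement is the Claim_ definition above) =====
theorem get_min_files_in_days_spec : Claim_equal_get_min_files_in_days := by
  intro data cutoff _ _
  unfold Spec_get_min_files_in_days get_min_files_in_days get_min_files_in_days_alt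
  simp only
  set d := PySem.Dict.ofList data with hd
  -- abbreviations
  set dv : String → PySem.Dict String Int :=
    fun mo => PySem.Dict.ofList ((PySem.Dict.ofList (d.getD mo [])).getD "days" []) with hdv
  -- rewrite each month's values as keys.map getD
  have hvals : ∀ mo, (dv mo).values = (dv mo).keys.map (fun day => (dv mo).getD day 0) := by
    intro mo
    exact PySem.Dict.values_eq_map_keys _ (PySem.Dict.nodup_keys_ofList _) 0
  -- outer induction over the month keys, with general state
  have outer : ∀ (ks : List String) (t : Int) (l : List String) (m : Int),
      ks.foldl (fun (st : Int × List String × Int) mo =>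
        (dv mo).keys.foldl (fun (st : Int × List String × Int) day =>
            let total := st.1 + 1
            let n := (dv mo).getD day 0
            if n < cutoff then (total, st.2.1 ++ [mo ++ "/" ++ day], st.2.2)
            else if n < st.2.2 then (total, st.2.1, n)
            else (total, st.2.1, st.2.2)) st) (t, l, m)
      = (t + ((ks.flatMap (fun mo => (dv mo).values)).length : Int),
         l ++ (ks.flatMap (fun mo =>
            ((dv mo).keys.filter (fun day => (dv mo).getD day 0 < cutoff)).map
              (fun day => mo ++ "/" ++ day))),
         (ks.flatMap (fun mo => (dv mo).values)).foldl (pvMstep cutoff) m) := by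
    intro ks
    induction ks with
    | nil => intro t l m; simp
    | cons mo ks ih =>
      intro t l m
      simp only [List.foldl_cons, List.flatMap_cons]
      rw [pv_inner cutoff (fun day => (dv mo).getD day 0) (fun day => mo ++ "/" ++ day), ih]
      rw [hvals mo]
      simp only [Prod.mk.injEq]
      refine ⟨?_, ?_, ?_⟩
      · simp only [List.length_append]
        push_cast; ring
      · simp [List.append_assoc]
      · rw [List.foldl_append]
  rw [outer]
  simp only [Prod.mk.injEq, true_and]
  refine ⟨?_, ?_, ?_⟩
  · rw [zero_add]
  · -- min component
    rw [pv_mstep_filter, List.filter_flatMap, ← pv_min_append]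
  · -- lower-than-cutoff count
    rw [List.nil_append, List.filter_flatMap]
    congr 1
    rw [List.length_flatMap, List.length_flatMap]
    congr 1
    refine List.map_congr_left ?_
    intro mo _
    rw [List.length_map, hvals mo, List.filter_map, List.length_map]
    rfl
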